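-- pv_equiv track=rewrite | github.com/AbrorjonPro/finance-bot | bot/database.py | get_all_payments
-- ===== SOURCE A (Python) =====
-- def get_intToSTR(summa):
--     if type(summa)!=int:
--         return summa
--     summa_str = str(summa)
--     indexi = 0
--     if summa_str.startswith('-'):
--         summa_str = summa_str[1:]
--     counter=0
--     for i in range(len(summa_str), 0, -1):
--         if counter>2:
--             summa_str = summa_str[0:i]+','+summa_str[i:]
--             counter=0
--         counter += 1
--     if "-" in str(summa):
--         summa_str = '-'+summa_str
--     return summa_str
--
-- def get_all_payments(payments, lang=None):
--     text = ''
--     if len(payments)==0: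
--         if lang=='ru':
--             return 'Платежек пока нет..'
--         if lang=='uz':
--             return 'To\'lovlar yo\'q..'
--         else:
--             return 'No payments yet..'
--     for pay in payments:
--         text+=f'  {pay[0]}                               {get_intToSTR(pay[1])}\n'
--     return text
-- ===== SOURCE B (Python) =====
-- def _group(digits):
--     # group a digit string in threes from the right, recursively
--     if len(digits) <= 3:
--         return digits
--     return _group(digits[:-3]) + ',' + digits[-3:]
--
-- def _fmt(amount):
--     s = str(amount)
--     if s.startswith('-'):
--         return '-' + _group(s[1:])
--     return _group(s)
--
-- def get_all_payments(payments, lang=None):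
--     if not payments:
--         if lang == 'ru':
--             return 'Платежек пока нет..'
--         if lang == 'uz':
--             return 'To\'lovlar yo\'q..'
--         return 'No payments yet..'
--     return ''.join(f'  {name}                               {_fmt(amount)}\n'
--                    for name, amount in payments)
-- ===== Notes on version B (the rewrite author's own statement) =====
-- stated objective: alternative
-- what changed: The comma-grouping helper is rewritten as a right-to-left structural recursion (group(s[:-3]) + ',' + s[-3:]) with an explicit sign split, replacing A's index loop over range(len,0,-1) with a counter that splices commas into the growing string; the line accumulation loop becomes a single ''.join over a generator.
import Mathlib
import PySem

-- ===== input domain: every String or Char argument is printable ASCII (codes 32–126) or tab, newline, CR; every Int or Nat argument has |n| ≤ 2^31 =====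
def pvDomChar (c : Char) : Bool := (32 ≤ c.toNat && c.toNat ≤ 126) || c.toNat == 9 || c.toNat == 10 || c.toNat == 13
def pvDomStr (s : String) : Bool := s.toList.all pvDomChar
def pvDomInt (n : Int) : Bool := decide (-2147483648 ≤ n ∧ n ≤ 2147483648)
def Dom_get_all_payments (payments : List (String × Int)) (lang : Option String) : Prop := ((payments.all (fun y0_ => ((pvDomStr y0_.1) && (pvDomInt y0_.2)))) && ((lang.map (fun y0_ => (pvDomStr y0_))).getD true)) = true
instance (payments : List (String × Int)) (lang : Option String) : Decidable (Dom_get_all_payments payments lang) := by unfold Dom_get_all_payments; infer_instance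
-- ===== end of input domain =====

-- B replaces A's counter-driven index loop that splices commas into the digit string by a right-to-left
-- recursion (group(s[:-3]) + ',' + s[-3:]) with an explicit sign split, and builds the text by join/flatten
-- instead of '+=' accumulation (objective: alternative decomposition, same cost).

-- ===== PORT A =====
-- body of A's 'for i in range(len(summa_str), 0, -1)' loop; state = (summa_str, counter)
def aStep (st : List Char × Int) (i : Int) : List Char × Int :=
  if st.2 > 2 then
    (PySem.List.slice st.1 (some 0) (some i) ++ [','] ++ PySem.List.slice st.1 (some i) none, (0 : Int) + 1)
  else (st.1, st.2 + 1)

-- get_intToSTR: summa is always an Int here, so the 'type(summa)!=int' guard never fires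
def a_get_intToSTR (summa : Int) : List Char :=
  let summa_str := PySem.Int.toChars summa
  let summa_str := if PySem.Chars.startswith summa_str ['-'] then PySem.List.slice summa_str (some 1) none else summa_str
  let st := (PySem.List.pyRange (PySem.Chars.len summa_str) 0 (-1)).foldl aStep (summa_str, 0)
  let summa_str := st.1
  if PySem.Chars.isIn ['-'] (PySem.Int.toChars summa) then ['-'] ++ summa_str else summa_str

def get_all_payments (payments : List (String × Int)) (lang : Option String) : String :=
  if payments.length == 0 then
    if lang == some "ru" then "Платежек пока нет.."
    else if lang == some "uz" then "To'lovlar yo'q.."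
    else "No payments yet.."
  else
    String.ofList (payments.foldl
      (fun text pay =>
        text ++ ("  ".toList ++ pay.1.toList ++ "                               ".toList
                   ++ a_get_intToSTR pay.2 ++ ['\n'])) [])

-- ===== PORT B =====
-- _group: group a digit string in threes from the right, recursively: _group(s[:-3]) + ',' + s[-3:]
def altGroup (digits : List Char) : List Char :=
  if digits.length ≤ 3 then digits
  else altGroup (PySem.List.slice digits none (some (-3))) ++ [','] ++ PySem.List.slice digits (some (-3)) none
termination_by digits.length
decreasing_by
  rw [PySem.List.slice_to_neg_ofNat digits 3 (by omega)]
  simp only [List.length_take]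
  omega

-- _fmt: sign split, then group the digits
def altFmt (amount : Int) : List Char :=
  let s := PySem.Int.toChars amount
  if PySem.Chars.startswith s ['-'] then '-' :: altGroup (PySem.List.slice s (some 1) none)
  else altGroup s

def get_all_payments_alt (payments : List (String × Int)) (lang : Option String) : String :=
  if payments.isEmpty then
    if lang == some "ru" then "Платежек пока нет.."
    else if lang == some "uz" then "To'lovlar yo'q.."
    else "No payments yet.."
  else
    String.ofList ((payments.map
      (fun pay => "  ".toList ++ pay.1.toList ++ "                               ".toList
                    ++ altFmt pay.2 ++ ['\n'])).flatten)

-- ===== PRECONDITION & SPEC =====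
def Spec_get_all_payments (payments : List (String × Int)) (lang : Option String) (out : String) : Prop := out = get_all_payments_alt payments lang
instance (payments : List (String × Int)) (lang : Option String) (out : String) : Decidable (Spec_get_all_payments payments lang out) := by unfold Spec_get_all_payments; infer_instance

-- ===== CLAIM (what is proved, stated in full; the proofs are below) =====
def Claim_equal_get_all_payments : Prop := ∀ (payments : List (String × Int)) (lang : Option String), Dom_get_all_payments payments lang → Spec_get_all_payments payments lang (get_all_payments payments lang)

-- ===== LEMMAS AND PROOFS =====

-- A's splices touch only the first component; an untouched suffix rides along unchanged
theorem foldl_aStep_append (is : List Int) : ∀ (l rest : List Char) (c : Int),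
    (∀ i ∈ is, 0 ≤ i ∧ i.toNat ≤ l.length) →
    is.foldl aStep (l ++ rest, c) = ((is.foldl aStep (l, c)).1 ++ rest, (is.foldl aStep (l, c)).2) := by
  induction is with
  | nil => intro l rest c _; simp
  | cons i is ih =>
    intro l rest c h
    obtain ⟨hi, hile⟩ := h i (List.mem_cons_self ..)
    simp only [List.foldl_cons]
    by_cases hc : c > 2
    · have hstep : aStep (l ++ rest, c) i =
          ((List.take i.toNat l ++ ',' :: List.drop i.toNat l) ++ rest, (0 : Int) + 1) := by
        simp [aStep, hc, PySem.List.slice_to (l ++ rest) hi, PySem.List.slice_from (l ++ rest) hi,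
          List.take_append_of_le_length hile, List.drop_append_of_le_length hile]
      have hstep' : aStep (l, c) i =
          (List.take i.toNat l ++ ',' :: List.drop i.toNat l, (0 : Int) + 1) := by
        simp [aStep, hc, PySem.List.slice_to l hi, PySem.List.slice_from l hi]
      rw [hstep, hstep', ih]
      intro j hj
      obtain ⟨h1, h2⟩ := h j (List.mem_cons_of_mem _ hj)
      refine ⟨h1, ?_⟩
      simp only [List.length_append, List.length_take, List.length_cons, List.length_drop]
      omega
    · have hstep : aStep (l ++ rest, c) i = (l ++ rest, c + 1) := by simp [aStep, hc]
      have hstep' : aStep (l, c) i = (l, c + 1) := by simp [aStep, hc]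
      rw [hstep, hstep', ih]
      intro j hj; exact h j (List.mem_cons_of_mem _ hj)

-- while the counter budget is not exhausted A's loop only counts
theorem foldl_aStep_small (is : List Int) : ∀ (l : List Char) (c : Int),
    0 ≤ c → c + is.length ≤ 3 → is.foldl aStep (l, c) = (l, c + is.length) := by
  induction is with
  | nil => intro l c _ _; simp
  | cons i is ih =>
    intro l c hc hlen
    simp only [List.length_cons] at hlen
    have hc2 : ¬ c > 2 := by omega
    simp only [List.foldl_cons]
    have : aStep (l, c) i = (l, c + 1) := by simp [aStep, hc2]
    rw [this, ih l (c + 1) (by omega) (by omega)]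
    simp; omega

-- A's splicing loop computes exactly B's right-to-left grouping
theorem loop_eq_altGroup : ∀ (l : List Char),
    ((PySem.List.pyRange (PySem.Chars.len l) 0 (-1)).foldl aStep (l, 0)).1 = altGroup l := by
  suffices H : ∀ (n : Nat) (l : List Char), l.length = n →
      ((PySem.List.pyRange (PySem.Chars.len l) 0 (-1)).foldl aStep (l, 0)).1 = altGroup l by
    intro l; exact H l.length l rfl
  intro n
  induction n using Nat.strong_induction_on with
  | _ n ih =>
    intro l hl
    rw [PySem.Chars.len_eq]
    by_cases hsmall : l.length ≤ 3
    · rw [foldl_aStep_small _ l 0 le_rfl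
        (by simp [PySem.List.length_pyRange_neg_one]; omega)]
      rw [altGroup]
      simp [hsmall]
    · rw [not_le] at hsmall
      have hrange : PySem.List.pyRange ((l.length : Nat) : Int) 0 (-1) =
          (l.length : Int) :: ((l.length : Int) - 1) :: ((l.length : Int) - 1 - 1) ::
          ((l.length : Int) - 1 - 1 - 1) :: PySem.List.pyRange ((l.length : Int) - 1 - 1 - 1 - 1) 0 (-1) := by
        rw [PySem.List.pyRange_neg_one_cons (by omega),
            PySem.List.pyRange_neg_one_cons (by omega),
            PySem.List.pyRange_neg_one_cons (by omega),
            PySem.List.pyRange_neg_one_cons (by omega)]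
      have htoNat : ((l.length : Int) - 1 - 1 - 1).toNat = l.length - 3 := by omega
      have hsplice : aStep (l, 3) ((l.length : Int) - 1 - 1 - 1) =
          (List.take (l.length - 3) l ++ ',' :: List.drop (l.length - 3) l, (0 : Int) + 1) := by
        simp [aStep, PySem.List.slice_to l (by omega : (0:Int) ≤ (l.length : Int) - 1 - 1 - 1),
          PySem.List.slice_from l (by omega : (0:Int) ≤ (l.length : Int) - 1 - 1 - 1), htoNat]
      have hbounds : ∀ i ∈ PySem.List.pyRange ((l.length : Int) - 1 - 1 - 1 - 1) 0 (-1),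
          0 ≤ i ∧ i.toNat ≤ (List.take (l.length - 3) l).length := by
        intro i hi
        rw [PySem.List.mem_pyRange_neg_one] at hi
        refine ⟨by omega, ?_⟩
        simp only [List.length_take]
        omega
      rw [hrange]
      simp only [List.foldl_cons]
      rw [show aStep (l, 0) ((l.length : Nat) : Int) = (l, 1) from by norm_num [aStep],
          show aStep (l, 1) ((l.length : Int) - 1) = (l, 2) from by norm_num [aStep],
          show aStep (l, 2) ((l.length : Int) - 1 - 1) = (l, 3) from by norm_num [aStep],
          hsplice]
      rw [show List.take (l.length - 3) l ++ ',' :: List.drop (l.length - 3) l =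
            List.take (l.length - 3) l ++ (',' :: List.drop (l.length - 3) l) from rfl,
          foldl_aStep_append _ _ _ _ hbounds]
      -- the fresh loop on the prefix: its first iteration (counter 0) is a no-op
      have hlen_take : (List.take (l.length - 3) l).length = l.length - 3 := by
        simp only [List.length_take]; omega
      have hfresh := ih (l.length - 3) (by omega) (List.take (l.length - 3) l) hlen_take
      rw [PySem.Chars.len_eq, hlen_take] at hfresh
      rw [PySem.List.pyRange_neg_one_cons (by omega : (0:Int) < ((l.length - 3 : Nat) : Int))] at hfresh
      simp only [List.foldl_cons] at hfresh
      rw [show aStep (List.take (l.length - 3) l, 0) (((l.length - 3 : Nat) : Int)) =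
            (List.take (l.length - 3) l, (0:Int) + 1) from by norm_num [aStep]] at hfresh
      rw [show ((l.length - 3 : Nat) : Int) - 1 = (l.length : Int) - 1 - 1 - 1 - 1 from by omega] at hfresh
      rw [hfresh]
      conv_rhs => rw [altGroup]
      rw [if_neg (by omega)]
      rw [PySem.List.slice_to_neg_ofNat l 3 (by omega), PySem.List.slice_from_neg_ofNat l 3 (by omega)]
      simp

-- str(n) for n ≥ 0 contains no '-'
theorem digitChar_ne_dash (n : Nat) : Nat.digitChar n ≠ '-' := by
  by_cases h : n < 16
  · interval_cases n <;> decide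
  · unfold Nat.digitChar
    rw [if_neg (by omega), if_neg (by omega), if_neg (by omega), if_neg (by omega),
        if_neg (by omega), if_neg (by omega), if_neg (by omega), if_neg (by omega),
        if_neg (by omega), if_neg (by omega), if_neg (by omega), if_neg (by omega),
        if_neg (by omega), if_neg (by omega), if_neg (by omega), if_neg (by omega)]
    decide

theorem toDigitsCore_no_dash : ∀ (fuel n : Nat) (acc : List Char),
    '-' ∉ acc → '-' ∉ Nat.toDigitsCore 10 fuel n acc := by
  intro fuel
  induction fuel with
  | zero => intro n acc h; simpa [Nat.toDigitsCore] using h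
  | succ fuel ih =>
    intro n acc h
    rw [Nat.toDigitsCore]
    split
    · intro hc
      rcases List.mem_cons.mp hc with h1 | h1
      · exact digitChar_ne_dash _ h1.symm
      · exact h h1
    · exact ih _ _ (by
        intro hc
        rcases List.mem_cons.mp hc with h1 | h1
        · exact digitChar_ne_dash _ h1.symm
        · exact h h1)

theorem toDigits_no_dash (n : Nat) : '-' ∉ Nat.toDigits 10 n :=
  toDigitsCore_no_dash _ _ _ (by simp)

-- the two comma-formatters agree on every Int
theorem fmt_eq (n : Int) : a_get_intToSTR n = altFmt n := by
  unfold a_get_intToSTR altFmt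
  by_cases hn : n < 0
  · have htc : PySem.Int.toChars n = '-' :: Nat.toDigits 10 n.natAbs := by
      simp [PySem.Int.toChars, hn]
    have hsw : PySem.Chars.startswith (PySem.Int.toChars n) ['-'] = true := by
      rw [PySem.Chars.startswith_iff, htc]
      exact ⟨Nat.toDigits 10 n.natAbs, rfl⟩
    have hin : PySem.Chars.isIn ['-'] (PySem.Int.toChars n) = true := by
      rw [PySem.Chars.isIn_iff_infix, htc]
      exact ⟨[], Nat.toDigits 10 n.natAbs, rfl⟩
    simp only [hsw, hin, if_true]
    rw [loop_eq_altGroup]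
    rfl
  · have htc : PySem.Int.toChars n = Nat.toDigits 10 n.toNat := by
      simp [PySem.Int.toChars, hn]
    have hnd : '-' ∉ PySem.Int.toChars n := by rw [htc]; exact toDigits_no_dash _
    have hsw : PySem.Chars.startswith (PySem.Int.toChars n) ['-'] = false := by
      rw [Bool.eq_false_iff]
      intro hc
      rw [PySem.Chars.startswith_iff] at hc
      exact hnd (hc.subset (List.mem_singleton_self _))
    have hin : PySem.Chars.isIn ['-'] (PySem.Int.toChars n) = false := by
      rw [Bool.eq_false_iff]
      intro hc
      rw [PySem.Chars.isIn_iff_infix] at hc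
      exact hnd (hc.subset (List.mem_singleton_self _))
    simp only [hsw, hin, Bool.false_eq_true, if_false]
    rw [loop_eq_altGroup]

-- ===== VERDICT (by name: the statement is the Claim_ definition above) =====
theorem get_all_payments_spec : Claim_equal_get_all_payments := by
  intro payments lang _
  unfold Spec_get_all_payments get_all_payments get_all_payments_alt
  cases payments with
  | nil => simp
  | cons p ps =>
    have hfun : (fun (pay : String × Int) => "  ".toList ++ pay.1.toList
          ++ "                               ".toList ++ a_get_intToSTR pay.2 ++ ['\n'])
        = (fun (pay : String × Int) => "  ".toList ++ pay.1.toList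
          ++ "                               ".toList ++ altFmt pay.2 ++ ['\n']) := by
      funext pay; rw [fmt_eq]
    rw [if_neg (by simp), if_neg (by simp)]
    rw [PySem.List.foldl_append_eq_flatMap, List.nil_append, List.flatMap_def, hfun]
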